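-- pv_equiv track=rewrite | github.com/weareguid/polymarket | scripts/research/correlation_pipeline.py | get_assigned_tickers
-- ===== SOURCE A (Python) =====
-- def get_assigned_tickers(category, question):
--     """Simple heuristic for what tickers were 'assigned' in the original KB."""
--     q = question.lower() if question else ""
--
--     assignments = []
--     if any(k in q for k in ["fed", "rate", "fomc", "powell", "inflation", "cpi"]):
--         assignments = ["TLT", "SHY", "IEF"]
--     elif any(k in q for k in ["trump", "republican", "gop"]):
--         assignments = ["DJT", "XLE", "GEO"]
--     elif any(k in q for k in ["iran", "israel", "ukraine", "russia", "war", "attack", "ceasefire"]):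
--         assignments = ["XLE", "GLD", "RTX", "LMT", "ITA"]
--     elif any(k in q for k in ["oil", "opec", "crude", "energy"]):
--         assignments = ["XLE", "USO", "OIH"]
--     elif any(k in q for k in ["nvidia", "ai", "openai", "llm", "chip", "semiconductor"]):
--         assignments = ["NVDA", "SOXX", "AMD"]
--     elif any(k in q for k in ["bitcoin", "crypto", "btc"]):
--         assignments = ["MSTR", "COIN"]
--     elif any(k in q for k in ["election", "harris", "democrat", "biden"]):
--         assignments = ["TLT", "GLD"]
--     elif "gold" in q or "gld" in q:
--         assignments = ["GLD", "GDX"]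
--     return assignments
-- ===== SOURCE B (Python) =====
-- # One flat keyword -> priority map; a single pass keeps the lowest-priority hit,
-- # then the ticker group is looked up by that index.
-- KEYWORD_PRIORITY = {
--     "fed": 0, "rate": 0, "fomc": 0, "powell": 0, "inflation": 0, "cpi": 0,
--     "trump": 1, "republican": 1, "gop": 1,
--     "iran": 2, "israel": 2, "ukraine": 2, "russia": 2, "war": 2, "attack": 2, "ceasefire": 2,
--     "oil": 3, "opec": 3, "crude": 3, "energy": 3,
--     "nvidia": 4, "ai": 4, "openai": 4, "llm": 4, "chip": 4, "semiconductor": 4,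
--     "bitcoin": 5, "crypto": 5, "btc": 5,
--     "election": 6, "harris": 6, "democrat": 6, "biden": 6,
--     "gold": 7, "gld": 7,
-- }
--
-- TICKER_GROUPS = [
--     ["TLT", "SHY", "IEF"],
--     ["DJT", "XLE", "GEO"],
--     ["XLE", "GLD", "RTX", "LMT", "ITA"],
--     ["XLE", "USO", "OIH"],
--     ["NVDA", "SOXX", "AMD"],
--     ["MSTR", "COIN"],
--     ["TLT", "GLD"],
--     ["GLD", "GDX"],
-- ]
--
--
-- def get_assigned_tickers(category, question):
--     """Minimum-priority keyword hit over a flat keyword->priority map."""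
--     q = question.lower() if question else ""
--     best = None
--     for kw, prio in KEYWORD_PRIORITY.items():
--         if kw in q and (best is None or prio < best):
--             best = prio
--     return [] if best is None else list(TICKER_GROUPS[best])
-- ===== Notes on version B (the rewrite author's own statement) =====
-- stated objective: alternative
-- what changed: Replaces the eight-way first-match if/elif cascade with one flat keyword->priority map scanned in a single pass that keeps the minimum matching priority, followed by an indexed ticker-group lookup.
import Mathlib
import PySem

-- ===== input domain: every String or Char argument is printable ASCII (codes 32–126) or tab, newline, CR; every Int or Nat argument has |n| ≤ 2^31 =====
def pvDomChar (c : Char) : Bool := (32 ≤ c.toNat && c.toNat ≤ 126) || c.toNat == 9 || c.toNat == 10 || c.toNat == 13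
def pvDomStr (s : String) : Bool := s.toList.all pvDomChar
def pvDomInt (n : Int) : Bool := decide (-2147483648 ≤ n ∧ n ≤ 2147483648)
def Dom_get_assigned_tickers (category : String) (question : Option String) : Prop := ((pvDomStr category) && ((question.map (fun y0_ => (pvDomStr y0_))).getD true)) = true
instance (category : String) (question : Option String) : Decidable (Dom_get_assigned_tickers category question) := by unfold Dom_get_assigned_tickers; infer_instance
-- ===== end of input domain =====

-- B replaces A's if/elif keyword cascade with a flat keyword->priority map scanned in
-- one pass keeping the minimum matching priority, then an indexed group lookup
-- (alternative decomposition, same cost).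


-- ===== PORT A =====
def get_assigned_tickers (category : String) (question : Option String) : List String :=
  let q : String :=
    match question with
    | none => ""
    | some s => if s == "" then "" else PySem.Str.lower s
  if (["fed", "rate", "fomc", "powell", "inflation", "cpi"]).any (fun k => PySem.Str.isIn k q) then
    ["TLT", "SHY", "IEF"]
  else if (["trump", "republican", "gop"]).any (fun k => PySem.Str.isIn k q) then
    ["DJT", "XLE", "GEO"]
  else if (["iran", "israel", "ukraine", "russia", "war", "attack", "ceasefire"]).any (fun k => PySem.Str.isIn k q) then
    ["XLE", "GLD", "RTX", "LMT", "ITA"]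
  else if (["oil", "opec", "crude", "energy"]).any (fun k => PySem.Str.isIn k q) then
    ["XLE", "USO", "OIH"]
  else if (["nvidia", "ai", "openai", "llm", "chip", "semiconductor"]).any (fun k => PySem.Str.isIn k q) then
    ["NVDA", "SOXX", "AMD"]
  else if (["bitcoin", "crypto", "btc"]).any (fun k => PySem.Str.isIn k q) then
    ["MSTR", "COIN"]
  else if (["election", "harris", "democrat", "biden"]).any (fun k => PySem.Str.isIn k q) then
    ["TLT", "GLD"]
  else if PySem.Str.isIn "gold" q || PySem.Str.isIn "gld" q then
    ["GLD", "GDX"]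
  else
    []

-- ===== PORT B =====
-- flat keyword -> priority association list (Source B's KEYWORD_PRIORITY, insertion order)
def pvKeywordPriority : List (String × Nat) :=
  [ ("fed", 0), ("rate", 0), ("fomc", 0), ("powell", 0), ("inflation", 0), ("cpi", 0),
    ("trump", 1), ("republican", 1), ("gop", 1),
    ("iran", 2), ("israel", 2), ("ukraine", 2), ("russia", 2), ("war", 2), ("attack", 2), ("ceasefire", 2),
    ("oil", 3), ("opec", 3), ("crude", 3), ("energy", 3),
    ("nvidia", 4), ("ai", 4), ("openai", 4), ("llm", 4), ("chip", 4), ("semiconductor", 4),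
    ("bitcoin", 5), ("crypto", 5), ("btc", 5),
    ("election", 6), ("harris", 6), ("democrat", 6), ("biden", 6),
    ("gold", 7), ("gld", 7) ]

def pvTickerGroups : List (List String) :=
  [ ["TLT", "SHY", "IEF"],
    ["DJT", "XLE", "GEO"],
    ["XLE", "GLD", "RTX", "LMT", "ITA"],
    ["XLE", "USO", "OIH"],
    ["NVDA", "SOXX", "AMD"],
    ["MSTR", "COIN"],
    ["TLT", "GLD"],
    ["GLD", "GDX"] ]

-- one step of Source B's loop body: `if kw in q and (best is None or prio < best): best = prio`
def pvStep (q : String) (best : Option Nat) (p : String × Nat) : Option Nat :=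
  if PySem.Str.isIn p.1 q && (best.isNone || decide (p.2 < best.getD 0)) then some p.2 else best

def get_assigned_tickers_alt (category : String) (question : Option String) : List String :=
  let q : String :=
    match question with
    | none => ""
    | some s => if s == "" then "" else PySem.Str.lower s
  match pvKeywordPriority.foldl (pvStep q) none with
  | none => []
  | some i => pvTickerGroups.getD i []

-- ===== PRECONDITION & SPEC =====
def Spec_get_assigned_tickers (category : String) (question : Option String) (out : List String) : Prop := out = get_assigned_tickers_alt category question
instance (category : String) (question : Option String) (out : List String) : Decidable (Spec_get_assigned_tickers category question out) := by unfold Spec_get_assigned_tickers; infer_instance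

-- ===== CLAIM (what is proved, stated in full; the proofs are below) =====
def Claim_equal_get_assigned_tickers : Prop := ∀ (category : String) (question : Option String), Dom_get_assigned_tickers category question → Spec_get_assigned_tickers category question (get_assigned_tickers category question)

-- ===== LEMMAS AND PROOFS =====

-- a segment of the keyword table: all keywords of one group share its priority
def pvSeg (i : Nat) (kws : List String) : List (String × Nat) :=
  kws.map (fun k => (k, i))

-- once `best = some j` with j at most every remaining priority, the fold keeps it
theorem pvFoldStay (q : String) (j : Nat) (l : List (String × Nat))
    (h : ∀ p ∈ l, j ≤ p.2) : List.foldl (pvStep q) (some j) l = some j := by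
  induction l with
  | nil => rfl
  | cons p t ih =>
    have hp : j ≤ p.2 := h p (by simp)
    have hstep : pvStep q (some j) p = some j := by
      simp [pvStep, Nat.not_lt.mpr hp]
    rw [List.foldl_cons, hstep]
    exact ih (fun r hr => h r (by simp [hr]))

theorem pvFoldSegSome (q : String) (j i : Nat) (kws : List String) (h : j ≤ i) :
    List.foldl (pvStep q) (some j) (pvSeg i kws) = some j := by
  apply pvFoldStay
  intro p hp
  simp only [pvSeg, List.mem_map] at hp
  obtain ⟨k, _, rfl⟩ := hp
  exact h

theorem pvFoldSegNone (q : String) (i : Nat) (kws : List String) :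
    List.foldl (pvStep q) none (pvSeg i kws)
      = if kws.any (fun k => PySem.Str.isIn k q) then some i else none := by
  induction kws with
  | nil => rfl
  | cons k t ih =>
    have hseg : pvSeg i (k :: t) = (k, i) :: pvSeg i t := rfl
    by_cases hk : PySem.Str.isIn k q = true
    · have hstep : pvStep q none (k, i) = some i := by unfold pvStep; rw [hk]; rfl
      rw [hseg, List.foldl_cons, hstep, pvFoldSegSome q i i t (Nat.le_refl i),
          List.any_cons, hk]
      rfl
    · rw [Bool.not_eq_true] at hk
      have hstep : pvStep q none (k, i) = none := by unfold pvStep; rw [hk]; rfl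
      rw [hseg, List.foldl_cons, hstep, ih, List.any_cons, hk, Bool.false_or]

-- the table is the concatenation of its eight group segments
theorem pvTableSplit : pvKeywordPriority =
    pvSeg 0 ["fed", "rate", "fomc", "powell", "inflation", "cpi"] ++
    (pvSeg 1 ["trump", "republican", "gop"] ++
    (pvSeg 2 ["iran", "israel", "ukraine", "russia", "war", "attack", "ceasefire"] ++
    (pvSeg 3 ["oil", "opec", "crude", "energy"] ++
    (pvSeg 4 ["nvidia", "ai", "openai", "llm", "chip", "semiconductor"] ++
    (pvSeg 5 ["bitcoin", "crypto", "btc"] ++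
    (pvSeg 6 ["election", "harris", "democrat", "biden"] ++
    pvSeg 7 ["gold", "gld"])))))) := rfl

-- the fold over the whole table is the first matching group's priority
theorem pvFoldAll (q : String) : List.foldl (pvStep q) none pvKeywordPriority =
    (if (["fed", "rate", "fomc", "powell", "inflation", "cpi"]).any (fun k => PySem.Str.isIn k q) then some 0
     else if (["trump", "republican", "gop"]).any (fun k => PySem.Str.isIn k q) then some 1
     else if (["iran", "israel", "ukraine", "russia", "war", "attack", "ceasefire"]).any (fun k => PySem.Str.isIn k q) then some 2
     else if (["oil", "opec", "crude", "energy"]).any (fun k => PySem.Str.isIn k q) then some 3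
     else if (["nvidia", "ai", "openai", "llm", "chip", "semiconductor"]).any (fun k => PySem.Str.isIn k q) then some 4
     else if (["bitcoin", "crypto", "btc"]).any (fun k => PySem.Str.isIn k q) then some 5
     else if (["election", "harris", "democrat", "biden"]).any (fun k => PySem.Str.isIn k q) then some 6
     else if (["gold", "gld"]).any (fun k => PySem.Str.isIn k q) then some 7
     else none) := by
  rw [pvTableSplit]
  simp only [List.foldl_append]
  rw [pvFoldSegNone]
  by_cases h0 : (["fed", "rate", "fomc", "powell", "inflation", "cpi"]).any (fun k => PySem.Str.isIn k q) = true
  · rw [if_pos h0, pvFoldSegSome q 0 1 _ (by omega), pvFoldSegSome q 0 2 _ (by omega),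
        pvFoldSegSome q 0 3 _ (by omega), pvFoldSegSome q 0 4 _ (by omega),
        pvFoldSegSome q 0 5 _ (by omega), pvFoldSegSome q 0 6 _ (by omega),
        pvFoldSegSome q 0 7 _ (by omega), if_pos h0]
  · rw [if_neg h0, if_neg h0, pvFoldSegNone]
    by_cases h1 : (["trump", "republican", "gop"]).any (fun k => PySem.Str.isIn k q) = true
    · rw [if_pos h1, pvFoldSegSome q 1 2 _ (by omega), pvFoldSegSome q 1 3 _ (by omega),
          pvFoldSegSome q 1 4 _ (by omega), pvFoldSegSome q 1 5 _ (by omega),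
          pvFoldSegSome q 1 6 _ (by omega), pvFoldSegSome q 1 7 _ (by omega), if_pos h1]
    · rw [if_neg h1, if_neg h1, pvFoldSegNone]
      by_cases h2 : (["iran", "israel", "ukraine", "russia", "war", "attack", "ceasefire"]).any (fun k => PySem.Str.isIn k q) = true
      · rw [if_pos h2, pvFoldSegSome q 2 3 _ (by omega), pvFoldSegSome q 2 4 _ (by omega),
            pvFoldSegSome q 2 5 _ (by omega), pvFoldSegSome q 2 6 _ (by omega),
            pvFoldSegSome q 2 7 _ (by omega), if_pos h2]
      · rw [if_neg h2, if_neg h2, pvFoldSegNone]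
        by_cases h3 : (["oil", "opec", "crude", "energy"]).any (fun k => PySem.Str.isIn k q) = true
        · rw [if_pos h3, pvFoldSegSome q 3 4 _ (by omega), pvFoldSegSome q 3 5 _ (by omega),
              pvFoldSegSome q 3 6 _ (by omega), pvFoldSegSome q 3 7 _ (by omega), if_pos h3]
        · rw [if_neg h3, if_neg h3, pvFoldSegNone]
          by_cases h4 : (["nvidia", "ai", "openai", "llm", "chip", "semiconductor"]).any (fun k => PySem.Str.isIn k q) = true
          · rw [if_pos h4, pvFoldSegSome q 4 5 _ (by omega), pvFoldSegSome q 4 6 _ (by omega),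
                pvFoldSegSome q 4 7 _ (by omega), if_pos h4]
          · rw [if_neg h4, if_neg h4, pvFoldSegNone]
            by_cases h5 : (["bitcoin", "crypto", "btc"]).any (fun k => PySem.Str.isIn k q) = true
            · rw [if_pos h5, pvFoldSegSome q 5 6 _ (by omega), pvFoldSegSome q 5 7 _ (by omega), if_pos h5]
            · rw [if_neg h5, if_neg h5, pvFoldSegNone]
              by_cases h6 : (["election", "harris", "democrat", "biden"]).any (fun k => PySem.Str.isIn k q) = true
              · rw [if_pos h6, pvFoldSegSome q 6 7 _ (by omega), if_pos h6]
              · rw [if_neg h6, if_neg h6, pvFoldSegNone]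

-- cascade = minimum-priority fold, for any lowered question text q
theorem pvCore (q : String) :
    (if (["fed", "rate", "fomc", "powell", "inflation", "cpi"]).any (fun k => PySem.Str.isIn k q) then
      ["TLT", "SHY", "IEF"]
    else if (["trump", "republican", "gop"]).any (fun k => PySem.Str.isIn k q) then
      ["DJT", "XLE", "GEO"]
    else if (["iran", "israel", "ukraine", "russia", "war", "attack", "ceasefire"]).any (fun k => PySem.Str.isIn k q) then
      ["XLE", "GLD", "RTX", "LMT", "ITA"]
    else if (["oil", "opec", "crude", "energy"]).any (fun k => PySem.Str.isIn k q) then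
      ["XLE", "USO", "OIH"]
    else if (["nvidia", "ai", "openai", "llm", "chip", "semiconductor"]).any (fun k => PySem.Str.isIn k q) then
      ["NVDA", "SOXX", "AMD"]
    else if (["bitcoin", "crypto", "btc"]).any (fun k => PySem.Str.isIn k q) then
      ["MSTR", "COIN"]
    else if (["election", "harris", "democrat", "biden"]).any (fun k => PySem.Str.isIn k q) then
      ["TLT", "GLD"]
    else if PySem.Str.isIn "gold" q || PySem.Str.isIn "gld" q then
      ["GLD", "GDX"]
    else
      ([] : List String)) =
    (match List.foldl (pvStep q) none pvKeywordPriority with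
     | none => []
     | some i => pvTickerGroups.getD i []) := by
  rw [pvFoldAll]
  simp only [List.any_cons, List.any_nil, Bool.or_false]
  split_ifs <;> rfl

-- ===== VERDICT (by name: the statement is the Claim_ definition above) =====
theorem get_assigned_tickers_spec : Claim_equal_get_assigned_tickers := by
  intro category question _
  unfold Spec_get_assigned_tickers get_assigned_tickers get_assigned_tickers_alt
  cases question with
  | none => exact pvCore ""
  | some s => exact pvCore _
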